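-- pv_equiv track=rewrite | github.com/kyu4583/inha-ict-lab-auto-manager | calendar_manager.py | create_coordinates
-- ===== SOURCE A (Python) =====
-- def create_coordinates(week_list, last_day):
--
--     # 1일의 인덱스
--     index_1 = [1, week_list[1].index(1)]
--
--     # 각 일(=인덱스)의 좌표를 기록하는 리스트
--     coordinates = [[0, 0], index_1]
--
--     last_index = index_1
--     for i in range(2, last_day + 1):
--
--         # 이전 좌표가 주의 마지막일(토요일)이라면 좌표가 다음주로 넘어감
--         if (last_index[1] == 7):
--             current_index = [last_index[0] + 1, 1]
--         else:
--             current_index = [last_index[0], last_index[1] + 1]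
--
--         last_index = current_index
--         coordinates.append(current_index)
--
--     return coordinates
-- ===== SOURCE B (Python) =====
-- def create_coordinates(week_list, last_day):
--     # Direct arithmetic: day i sits at offset col0 + i - 2 from the first cell of week 1.
--     col0 = week_list[1].index(1)
--     return [[0, 0], [1, col0]] + [
--         [1 + (col0 + i - 2) // 7, (col0 + i - 2) % 7 + 1]
--         for i in range(2, last_day + 1)
--     ]
-- ===== Notes on version B (the rewrite author's own statement) =====
-- stated objective: simpler
-- what changed: B replaces A's loop that threads the previous coordinate forward (with an explicit Saturday-wrap branch) by a closed-form divmod formula computing each day's week/column directly from the day number.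
-- intended difference: When the first 1 in week_list[1] sits at index >= 8 (an impossible calendar week) and last_day >= 2, A's column counter starts past 7 and never wraps (e.g. [[0,0],[1,8],[1,9]]), while B wraps by arithmetic ([[0,0],[1,8],[2,2]]), which is the intended week/column grid. — e.g. on create_coordinates([[], [0, 0, 0, 0, 0, 0, 0, 0, 1]], 2): A returns [[0, 0], [1, 8], [1, 9]], B returns [[0, 0], [1, 8], [2, 2]]
import Mathlib
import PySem

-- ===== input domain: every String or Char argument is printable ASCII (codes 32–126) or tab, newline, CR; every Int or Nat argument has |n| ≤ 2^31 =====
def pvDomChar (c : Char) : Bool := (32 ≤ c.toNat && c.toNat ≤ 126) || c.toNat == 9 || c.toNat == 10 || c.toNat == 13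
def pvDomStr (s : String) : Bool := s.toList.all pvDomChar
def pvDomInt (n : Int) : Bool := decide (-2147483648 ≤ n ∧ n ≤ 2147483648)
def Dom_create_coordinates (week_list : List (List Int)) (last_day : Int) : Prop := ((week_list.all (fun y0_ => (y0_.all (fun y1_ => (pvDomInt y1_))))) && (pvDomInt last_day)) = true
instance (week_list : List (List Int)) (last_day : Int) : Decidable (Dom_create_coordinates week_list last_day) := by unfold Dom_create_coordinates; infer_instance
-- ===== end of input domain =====

-- B computes each day's grid cell by a closed-form divmod formula instead of A's loop that
-- threads the previous coordinate forward; proved equal outside D_ (first 1 at index ≥ 8).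

-- ===== PORT A =====
-- loop body of A, extracted as a helper (state = (last_index, coordinates))
def stepA (st : List Int × List (List Int)) (_i : Int) : List Int × List (List Int) :=
  let last_index := st.1
  let current_index : List Int :=
    if last_index[1]! = 7 then [last_index[0]! + 1, 1] else [last_index[0]!, last_index[1]! + 1]
  (current_index, st.2 ++ [current_index])

def create_coordinates (week_list : List (List Int)) (last_day : Int) : List (List Int) :=
  match PySem.List.pyGet? week_list 1 with
  | none => []          -- Python raises IndexError here; excluded by Pre_
  | some row =>
    match PySem.List.index? row 1 with
    | none => []        -- Python raises ValueError here; excluded by Pre_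
    | some c0 =>
      let index_1 : List Int := [1, (c0 : Int)]
      let st := (PySem.List.pyRange 2 (last_day + 1) 1).foldl stepA (index_1, [[0, 0], index_1])
      st.2

-- ===== PORT B =====
def create_coordinates_alt (week_list : List (List Int)) (last_day : Int) : List (List Int) :=
  match PySem.List.pyGet? week_list 1 with
  | none => []          -- Python raises IndexError here; excluded by Pre_
  | some row =>
    match PySem.List.index? row 1 with
    | none => []        -- Python raises ValueError here; excluded by Pre_
    | some c0 =>
      [[0, 0], [1, (c0 : Int)]] ++
        (PySem.List.pyRange 2 (last_day + 1) 1).map (fun i =>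
          [1 + PySem.Int.floordiv ((c0 : Int) + i - 2) 7,
           PySem.Int.mod ((c0 : Int) + i - 2) 7 + 1])

-- ===== PRECONDITION & SPEC =====
-- Pre_ excludes exactly the inputs where Python A raises: week_list[1] missing (IndexError)
-- or 1 absent from week_list[1] (ValueError).
def Pre_create_coordinates (week_list : List (List Int)) (last_day : Int) : Prop :=
  2 ≤ week_list.length ∧ (1 : Int) ∈ week_list[1]!
instance (week_list : List (List Int)) (last_day : Int) : Decidable (Pre_create_coordinates week_list last_day) := by unfold Pre_create_coordinates; infer_instance

def pvWitness_create_coordinates : List (List Int) × Int := ([[7, 1], [0, 0, 1, 0]], 10)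

-- When the first 1 in week_list[1] sits at index ≥ 8 (no calendar week has 8+ cells) and
-- last_day ≥ 2, A's column counter starts past 7 and never wraps to the next week, while B
-- wraps by arithmetic, which is the intended week/column grid.
def D_create_coordinates (week_list : List (List Int)) (last_day : Int) : Prop :=
  2 ≤ week_list.length ∧ (1 : Int) ∈ week_list[1]! ∧
    (1 : Int) ∉ (week_list[1]!.take 8) ∧ 2 ≤ last_day
instance (week_list : List (List Int)) (last_day : Int) : Decidable (D_create_coordinates week_list last_day) := by unfold D_create_coordinates; infer_instance

def Spec_create_coordinates (week_list : List (List Int)) (last_day : Int) (out : List (List Int)) : Prop := ¬ D_create_coordinates week_list last_day → out = create_coordinates_alt week_list last_day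
instance (week_list : List (List Int)) (last_day : Int) (out : List (List Int)) : Decidable (Spec_create_coordinates week_list last_day out) := by unfold Spec_create_coordinates; infer_instance

def pvDiffWitness_create_coordinates : List (List Int) × Int := ([[], [0, 0, 0, 0, 0, 0, 0, 0, 1]], 2)
def pvDiffWitnessOut_create_coordinates : (List (List Int)) × (List (List Int)) :=
  ([[0, 0], [1, 8], [1, 9]], [[0, 0], [1, 8], [2, 2]])

-- ===== CLAIM (what is proved, stated in full; the proofs are below) =====
def Claim_unchanged_create_coordinates : Prop := ∀ (week_list : List (List Int)) (last_day : Int), Dom_create_coordinates week_list last_day → Pre_create_coordinates week_list last_day → Spec_create_coordinates week_list last_day (create_coordinates week_list last_day)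
def Claim_changed_create_coordinates : Prop := Dom_create_coordinates (pvDiffWitness_create_coordinates.1) (pvDiffWitness_create_coordinates.2) ∧ Pre_create_coordinates (pvDiffWitness_create_coordinates.1) (pvDiffWitness_create_coordinates.2) ∧ D_create_coordinates (pvDiffWitness_create_coordinates.1) (pvDiffWitness_create_coordinates.2) ∧ create_coordinates (pvDiffWitness_create_coordinates.1) (pvDiffWitness_create_coordinates.2) = pvDiffWitnessOut_create_coordinates.1 ∧ create_coordinates_alt (pvDiffWitness_create_coordinates.1) (pvDiffWitness_create_coordinates.2) = pvDiffWitnessOut_create_coordinates.2 ∧ pvDiffWitnessOut_create_coordinates.1 ≠ pvDiffWitnessOut_create_coordinates.2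
def Claim_exact_create_coordinates : Prop := ∀ (week_list : List (List Int)) (last_day : Int), Dom_create_coordinates week_list last_day → Pre_create_coordinates week_list last_day → D_create_coordinates week_list last_day → create_coordinates week_list last_day ≠ create_coordinates_alt week_list last_day

-- ===== LEMMAS AND PROOFS =====

-- the closed-form cell of day i (for i ≥ 2), as port B computes it
def posB (c i : Int) : List Int :=
  [1 + PySem.Int.floordiv (c + i - 2) 7, PySem.Int.mod (c + i - 2) 7 + 1]

-- cell of day i for i ≥ 1 (day 1 is the special prefix entry)
def pos (c i : Int) : List Int := if i = 1 then [1, c] else posB c i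

lemma stepA_pair (x y : Int) (pre : List (List Int)) (z : Int) :
    stepA ([x, y], pre) z
      = if y = 7 then ([x + 1, 1], pre ++ [[x + 1, 1]]) else ([x, y + 1], pre ++ [[x, y + 1]]) := by
  simp only [stepA, List.getElem!_cons_succ, List.getElem!_cons_zero]
  split_ifs <;> simp

lemma step_pos (c m : Int) (h0 : 0 ≤ c) (h7 : c ≤ 7) (hm : 1 ≤ m)
    (pre : List (List Int)) (z : Int) :
    stepA (pos c m, pre) z = (pos c (m + 1), pre ++ [pos c (m + 1)]) := by
  have h7' : (0 : Int) < 7 := by norm_num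
  by_cases h1 : m = 1
  · subst h1
    rw [show pos c 1 = [1, c] by simp [pos], stepA_pair,
      show pos c (1 + 1) = posB c 2 by norm_num [pos]]
    simp only [posB, PySem.Int.floordiv_eq_ediv_of_pos h7', PySem.Int.mod_eq_emod_of_pos h7']
    split_ifs with h <;> refine Prod.ext ?_ ?_ <;> simp <;> omega
  · have h2 : 2 ≤ m := by omega
    rw [show pos c m = posB c m by simp [pos, h1],
      show pos c (m + 1) = posB c (m + 1) by simp [pos]; omega]
    simp only [posB, PySem.Int.floordiv_eq_ediv_of_pos h7', PySem.Int.mod_eq_emod_of_pos h7']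
    rw [stepA_pair]
    split_ifs with h <;> refine Prod.ext ?_ ?_ <;> simp <;> omega

lemma loop_eq (c : Int) (h0 : 0 ≤ c) (h7 : c ≤ 7) :
    ∀ (n : Nat) (a : Int), 2 ≤ a → ∀ (pre : List (List Int)),
      (PySem.List.pyRange a (a + n) 1).foldl stepA (pos c (a - 1), pre)
        = (pos c (a - 1 + n), pre ++ (PySem.List.pyRange a (a + n) 1).map (fun i => pos c i)) := by
  intro n
  induction n with
  | zero =>
    intro a ha pre
    rw [PySem.List.pyRange_one_eq_nil (by omega)]
    simp
  | succ k ih =>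
    intro a ha pre
    rw [show (((k + 1 : Nat)) : Int) = (k : Int) + 1 from by push_cast; ring,
      show a + ((k : Int) + 1) = (a + 1) + (k : Int) from by ring,
      PySem.List.pyRange_one_cons (by omega : a < (a + 1) + (k : Int))]
    simp only [List.foldl_cons, List.map_cons]
    rw [step_pos c (a - 1) h0 h7 (by omega) pre a,
      show a - 1 + 1 = (a + 1) - 1 from by ring, ih (a + 1) (by omega),
      show (a + 1) - 1 + (k : Int) = a - 1 + ((k : Int) + 1) from by ring,
      show (a + 1) - 1 = a from by ring]
    simp

-- the coordinates list A builds only ever grows: its snd extends the initial snd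
lemma foldl_stepA_snd_extends (l : List Int) :
    ∀ (st : List Int × List (List Int)), ∃ t, (l.foldl stepA st).2 = st.2 ++ t := by
  induction l with
  | nil => intro st; exact ⟨[], by simp⟩
  | cons x xs ih =>
    intro st
    obtain ⟨t, ht⟩ := ih (stepA st x)
    refine ⟨(stepA st x).2.drop st.2.length ++ t, ?_⟩
    rw [List.foldl_cons, ht]
    simp [stepA, List.append_assoc]

lemma pre_row (week_list : List (List Int)) (h2 : 2 ≤ week_list.length) :
    PySem.List.pyGet? week_list 1 = some week_list[1]! := by
  simp [PySem.List.pyGet?, PySem.List.pyIdx?, if_pos (by omega : 1 < week_list.length),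
    List.getElem!_eq_getElem?_getD, List.getElem?_eq_getElem (by omega : 1 < week_list.length)]

lemma index?_le_seven {row : List Int} {c0 : Nat}
    (hidx : PySem.List.index? row 1 = some c0) (hmem : (1 : Int) ∈ row.take 8) : c0 ≤ 7 := by
  by_contra h
  obtain ⟨pre, suf, hrow, hlen, hnot⟩ := (PySem.List.index?_eq_some_iff _ _ _).1 hidx
  have h8 : 8 ≤ pre.length := by omega
  rw [hrow, List.take_append_of_le_length h8] at hmem
  exact hnot (List.mem_of_mem_take hmem)

lemma index?_ge_eight {row : List Int} {c0 : Nat}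
    (hidx : PySem.List.index? row 1 = some c0) (hnmem : (1 : Int) ∉ row.take 8) : 8 ≤ c0 := by
  by_contra h
  obtain ⟨hk, hget, -⟩ := PySem.List.getElem_of_index?_eq_some hidx
  apply hnmem
  have hc8 : c0 < min 8 row.length := by omega
  have : (row.take 8)[c0]'(by simpa using hc8) = row[c0] := List.getElem_take
  rw [← hget, ← this]
  exact List.getElem_mem _

-- ===== VERDICT (by name: the statement is the Claim_ definition above) =====
theorem create_coordinates_spec : Claim_unchanged_create_coordinates := by
  intro week_list last_day hdom hpre hnd
  obtain ⟨h2, hmem⟩ := hpre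
  obtain ⟨c0, hidx⟩ := (PySem.List.index?_isSome_iff (xs := week_list[1]!) (v := (1:Int))).2 hmem
    |> fun h => Option.isSome_iff_exists.1 h
  unfold create_coordinates create_coordinates_alt
  rw [pre_row week_list h2]
  simp only [hidx]
  by_cases hld : last_day ≤ 1
  · rw [PySem.List.pyRange_one_eq_nil (by omega)]
    simp
  · -- last_day ≥ 2; ¬D_ forces 1 ∈ take 8, hence c0 ≤ 7
    have hmem8 : (1 : Int) ∈ week_list[1]!.take 8 := by
      by_contra hx
      exact hnd ⟨h2, hmem, hx, by omega⟩
    have hc7 : c0 ≤ 7 := index?_le_seven hidx hmem8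
    have hn : last_day + 1 = 2 + ((last_day - 1).toNat : Int) := by omega
    rw [hn]
    have hpos1 : pos (c0 : Int) 1 = [1, (c0 : Int)] := by simp [pos]
    have := loop_eq (c0 : Int) (by positivity) (by exact_mod_cast hc7)
      (last_day - 1).toNat 2 (by omega) [[0, 0], [1, (c0 : Int)]]
    rw [show (2:Int) - 1 = 1 by ring, hpos1] at this
    simp only [this]
    congr 1
    apply List.map_congr_left
    intro i hi
    have : 2 ≤ i := (PySem.List.mem_pyRange_one.1 hi).1
    simp [pos, posB, if_neg (by omega : ¬ i = 1)]

theorem create_coordinates_changed : Claim_changed_create_coordinates := by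
  unfold Claim_changed_create_coordinates; decide

theorem create_coordinates_tight : Claim_exact_create_coordinates := by
  intro week_list last_day hdom hpre hD heq
  obtain ⟨h2, hmem, hnmem, hld⟩ := hD
  obtain ⟨c0, hidx⟩ := Option.isSome_iff_exists.1
    ((PySem.List.index?_isSome_iff (xs := week_list[1]!) (v := (1:Int))).2 hmem)
  have hc8 : 8 ≤ c0 := index?_ge_eight hidx hnmem
  have hrange : PySem.List.pyRange 2 (last_day + 1) 1
      = 2 :: PySem.List.pyRange 3 (last_day + 1) 1 := by
    rw [PySem.List.pyRange_one_cons (by omega)]; norm_num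
  -- A's entry at index 2 is [1, c0+1]
  have hA : ∃ t, create_coordinates week_list last_day
      = [[0, 0], [1, (c0 : Int)], [1, (c0 : Int) + 1]] ++ t := by
    unfold create_coordinates
    rw [pre_row week_list h2]
    simp only [hidx, hrange, List.foldl_cons]
    have hst : stepA ([1, (c0 : Int)], [[0, 0], [1, (c0 : Int)]]) 2
        = ([1, (c0 : Int) + 1], [[0, 0], [1, (c0 : Int)], [1, (c0 : Int) + 1]]) := by
      simp [stepA, if_neg (by omega : ¬ (c0 : Int) = 7)]
    rw [hst]
    exact foldl_stepA_snd_extends _ _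
  -- B's entry at index 2 has week 1 + c0 // 7 ≥ 2
  have hB : ∃ t, create_coordinates_alt week_list last_day
      = [[0, 0], [1, (c0 : Int)],
         [1 + PySem.Int.floordiv ((c0 : Int) + 2 - 2) 7, PySem.Int.mod ((c0 : Int) + 2 - 2) 7 + 1]] ++ t := by
    unfold create_coordinates_alt
    rw [pre_row week_list h2]
    simp only [hidx, hrange]
    exact ⟨(PySem.List.pyRange 3 (last_day + 1) 1).map (fun i =>
      [1 + PySem.Int.floordiv ((c0 : Int) + i - 2) 7, PySem.Int.mod ((c0 : Int) + i - 2) 7 + 1]),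
      by simp⟩
  obtain ⟨tA, hAe⟩ := hA
  obtain ⟨tB, hBe⟩ := hB
  rw [hAe, hBe] at heq
  have h02 := congrArg (fun l => l[2]?) heq
  simp [List.cons_append] at h02
  omega
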